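-- pv_equiv track=rewrite | github.com/AlexWUrobot/leetcode_python | Count Idle Warehouse Robots.py | numIdleDrives
-- ===== SOURCE A (Python) =====
-- from typing import List
--
-- def numIdleDrives(x: List[int], y: List[int]) -> int:
--     # Build maps to store the range of robots for each coordinate
--     x_map = {}  # key: y-coord, value: (leftmost x, rightmost x)
--     y_map = {}  # key: x-coord, value: (lowest y, highest y)
--
--     # Build the maps
--     for i in range(len(x)):
--         curr_x, curr_y = x[i], y[i]
--
--         # Update x_map
--         if curr_y in x_map:
--             left, right = x_map[curr_y]
--             x_map[curr_y] = (min(left, curr_x), max(right, curr_x))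
--         else:
--             x_map[curr_y] = (curr_x, curr_x)
--
--         # Update y_map
--         if curr_x in y_map:
--             down, up = y_map[curr_x]
--             y_map[curr_x] = (min(down, curr_y), max(up, curr_y))
--         else:
--             y_map[curr_x] = (curr_y, curr_y)
--
--     # Count idle robots
--     idle_count = 0
--     for i in range(len(x)):
--         curr_x, curr_y = x[i], y[i]
--
--         # Check if robot is enclosed
--         if curr_y in x_map and curr_x in y_map:
--             left, right = x_map[curr_y]
--             down, up = y_map[curr_x]
--
--             # Robot is idle if there are robots to its left, right, above, and below
--             if left < curr_x and curr_x < right and down < curr_y and curr_y < up: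
--                 idle_count += 1
--
--     return idle_count
-- ===== SOURCE B (Python) =====
-- from typing import List
--
-- def numIdleDrives(x: List[int], y: List[int]) -> int:
--     # Brute force: a robot is idle iff some robot lies strictly left, right,
--     # below and above it on its own row/column; no range tables at all.
--     pts = list(zip(x, y))
--     count = 0
--     for px, py in pts:
--         if (any(qx < px and qy == py for qx, qy in pts)
--                 and any(qx > px and qy == py for qx, qy in pts)
--                 and any(qy < py and qx == px for qx, qy in pts)
--                 and any(qy > py and qx == px for qx, qy in pts)):
--             count += 1
--     return count
-- ===== Notes on version B (the rewrite author's own statement) =====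
-- stated objective: simpler
-- what changed: B drops A's two coordinate-keyed min/max dictionaries entirely and instead decides each robot directly by four existential scans over the zipped point list (is there a point strictly left/right on its row and strictly below/above on its column), counting in one loop.
import Mathlib
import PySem

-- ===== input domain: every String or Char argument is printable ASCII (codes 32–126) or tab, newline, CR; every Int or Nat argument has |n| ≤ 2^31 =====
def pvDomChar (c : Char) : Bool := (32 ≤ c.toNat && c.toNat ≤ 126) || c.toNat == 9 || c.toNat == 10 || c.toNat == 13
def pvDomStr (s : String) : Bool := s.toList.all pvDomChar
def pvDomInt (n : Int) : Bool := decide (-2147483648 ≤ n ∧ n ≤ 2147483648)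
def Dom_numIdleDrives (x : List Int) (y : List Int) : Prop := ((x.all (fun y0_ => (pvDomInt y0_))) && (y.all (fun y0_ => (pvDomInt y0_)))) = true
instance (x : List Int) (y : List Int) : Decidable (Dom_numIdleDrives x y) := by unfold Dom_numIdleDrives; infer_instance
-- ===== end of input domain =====

-- B replaces A's two coordinate-keyed min/max dictionaries by a direct brute-force
-- test: four existential scans over the zipped points per robot (objective: simpler;
-- quadratic instead of A's dict-based linear pass).

-- ===== PORT A =====
-- A's repeated update block: given the running dict and (key, coordinate),
-- widen the stored (min, max) pair, or start it at (coord, coord) for a new key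
def pvAUpdate (d : PySem.Dict Int (Int × Int)) (p : Int × Int) : PySem.Dict Int (Int × Int) :=
  if d.contains p.1 then
    d.insert p.1 (min (d.getD p.1 (0, 0)).1 p.2, max (d.getD p.1 (0, 0)).2 p.2)
  else d.insert p.1 (p.2, p.2)

-- body of A's first loop, on the values curr_x = x[i], curr_y = y[i]
def pvAStepVal (st : PySem.Dict Int (Int × Int) × PySem.Dict Int (Int × Int))
    (currX currY : Int) : PySem.Dict Int (Int × Int) × PySem.Dict Int (Int × Int) :=
  (pvAUpdate st.1 (currY, currX), pvAUpdate st.2 (currX, currY))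

def pvABuild (x y : List Int)
    (st : PySem.Dict Int (Int × Int) × PySem.Dict Int (Int × Int)) (i : Int) :
    PySem.Dict Int (Int × Int) × PySem.Dict Int (Int × Int) :=
  pvAStepVal st (PySem.List.pyGetD x i 0) (PySem.List.pyGetD y i 0)

-- body of A's second loop, on the values curr_x = x[i], curr_y = y[i]
def pvACountVal (maps : PySem.Dict Int (Int × Int) × PySem.Dict Int (Int × Int))
    (idleCount : Int) (currX currY : Int) : Int :=
  if maps.1.contains currY ∧ maps.2.contains currX then
    let p := maps.1.getD currY (0, 0)
    let q := maps.2.getD currX (0, 0)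
    if p.1 < currX ∧ currX < p.2 ∧ q.1 < currY ∧ currY < q.2 then idleCount + 1
    else idleCount
  else idleCount

def pvACount (x y : List Int) (maps : PySem.Dict Int (Int × Int) × PySem.Dict Int (Int × Int))
    (idleCount : Int) (i : Int) : Int :=
  pvACountVal maps idleCount (PySem.List.pyGetD x i 0) (PySem.List.pyGetD y i 0)

def numIdleDrives (x : List Int) (y : List Int) : Int :=
  let maps := (PySem.List.pyRange 0 (x.length : Int)).foldl (pvABuild x y)
    (PySem.Dict.empty, PySem.Dict.empty)
  (PySem.List.pyRange 0 (x.length : Int)).foldl (pvACount x y maps) 0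

-- ===== PORT B =====
-- B's if condition: the four any(...) scans over the point list
def pvIdle (pts : List (Int × Int)) (p : Int × Int) : Bool :=
  pts.any (fun q => decide (q.1 < p.1) && (q.2 == p.2)) &&
  pts.any (fun q => decide (q.1 > p.1) && (q.2 == p.2)) &&
  pts.any (fun q => decide (q.2 < p.2) && (q.1 == p.1)) &&
  pts.any (fun q => decide (q.2 > p.2) && (q.1 == p.1))

def numIdleDrives_alt (x : List Int) (y : List Int) : Int :=
  let pts := x.zip y
  pts.foldl (fun count p => if pvIdle pts p then count + 1 else count) 0

-- ===== PRECONDITION & SPEC =====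
-- Pre_ excludes only len(x) > len(y), where A raises IndexError on y[i]; extra trailing
-- y's (len(y) > len(x)) are ignored by A and by zip alike, so they stay inside Pre_.
def Pre_numIdleDrives (x : List Int) (y : List Int) : Prop := x.length ≤ y.length
instance (x : List Int) (y : List Int) : Decidable (Pre_numIdleDrives x y) := by unfold Pre_numIdleDrives; infer_instance
def pvWitness_numIdleDrives : List Int × List Int := ([1, 1, 1, 0, 2], [0, 2, 1, 1, 1])

def Spec_numIdleDrives (x : List Int) (y : List Int) (out : Int) : Prop := out = numIdleDrives_alt x y
instance (x : List Int) (y : List Int) (out : Int) : Decidable (Spec_numIdleDrives x y out) := by unfold Spec_numIdleDrives; infer_instance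

-- ===== CLAIM (what is proved, stated in full; the proofs are below) =====
def Claim_equal_numIdleDrives : Prop := ∀ (x : List Int) (y : List Int), Dom_numIdleDrives x y → Pre_numIdleDrives x y → Spec_numIdleDrives x y (numIdleDrives x y)

-- ===== LEMMAS AND PROOFS =====

-- a fold over range(len(x)) reading x[i], y[i] is a fold over zip(x, y)
theorem pvFoldIdx {σ : Type} (x y : List Int) (h : x.length ≤ y.length)
    (F : σ → Int → Int → σ) (init : σ) :
    (PySem.List.pyRange 0 (x.length : Int)).foldl
        (fun s i => F s (PySem.List.pyGetD x i 0) (PySem.List.pyGetD y i 0)) init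
      = (x.zip y).foldl (fun s p => F s p.1 p.2) init := by
  have hl : (x.zip y).length = x.length := by simp [List.length_zip]; omega
  rw [← PySem.List.foldl_pyRange_zero_pyGetD' (x.zip y) ((0 : Int), (0 : Int))
        (fun s p => F s p.1 p.2) init, hl]
  apply PySem.List.foldl_congr_mem
  intro acc i hi
  rw [PySem.List.mem_pyRange_one] at hi
  have hik : i < ((x.zip y).length : Int) := by omega
  rw [PySem.List.pyGetD_eq_getElem x 0 hi.1 (by omega),
      PySem.List.pyGetD_eq_getElem y 0 hi.1 (by omega),
      PySem.List.pyGetD_eq_getElem (x.zip y) ((0 : Int), (0 : Int)) hi.1 hik]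
  simp [List.getElem_zip]

def pvExt (q : Int × Int) (b : List Int) : Int × Int :=
  b.foldl (fun r v => (min r.1 v, max r.2 v)) q

-- invariant of A's dict-building loop: the stored pair is the (min, max) fold of the bucket
theorem pvG (l : List (Int × Int)) (d : PySem.Dict Int (Int × Int)) (k : Int) :
    (l.foldl pvAUpdate d).get? k =
      match d.get? k with
      | some q => some (pvExt q ((l.filter (fun p => p.1 == k)).map (·.2)))
      | none =>
        match (l.filter (fun p => p.1 == k)).map (·.2) with
        | [] => none
        | h :: t => some (pvExt (h, h) t) := by
  induction l generalizing d with
  | nil => cases hd : d.get? k <;> simp [hd, pvExt]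
  | cons p l ih =>
    obtain ⟨pk, pv⟩ := p
    rw [List.foldl_cons, ih]
    by_cases hk : pk = k
    · subst hk
      cases hd : d.get? pk with
      | some q =>
        have hc : d.contains pk = true := by
          rw [PySem.Dict.contains_eq_isSome_get?, hd]; rfl
        have hstep : (pvAUpdate d (pk, pv)).get? pk = some (min q.1 pv, max q.2 pv) := by
          simp only [pvAUpdate, hc, if_true]
          rw [PySem.Dict.get?_insert_self, PySem.Dict.getD_eq_get?_getD, hd]
          rfl
        rw [hstep]
        simp [pvExt]
      | none =>
        have hc : d.contains pk = false := by
          rw [PySem.Dict.contains_eq_isSome_get?, hd]; rfl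
        have hstep : (pvAUpdate d (pk, pv)).get? pk = some (pv, pv) := by
          simp only [pvAUpdate, hc, Bool.false_eq_true, if_false]
          rw [PySem.Dict.get?_insert_self]
        rw [hstep]
        simp [pvExt]
    · have hstep : (pvAUpdate d (pk, pv)).get? k = d.get? k := by
        unfold pvAUpdate
        split <;> { apply PySem.Dict.get?_insert_of_ne; exact fun h => hk h.symm }
      rw [hstep]
      simp [hk]

-- the pair fold is the two scalar folds
theorem pvExt_eq (h : Int) (t : List Int) :
    pvExt (h, h) t = (t.foldl min h, t.foldl max h) := by
  unfold pvExt
  rw [PySem.List.foldl_prod_mk (fun a v => min a v) (fun b v => max b v) t h h]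

-- running min below v ↔ some element below v
theorem pvFoldMinLt (t : List Int) (h v : Int) :
    t.foldl min h < v ↔ ∃ u ∈ h :: t, u < v := by
  induction t generalizing h with
  | nil => simp
  | cons a t ih =>
    rw [List.foldl_cons, ih, List.exists_mem_cons_iff, List.exists_mem_cons_iff,
        List.exists_mem_cons_iff, min_lt_iff]
    tauto

-- running max above v ↔ some element above v
theorem pvFoldMaxGt (t : List Int) (h v : Int) :
    v < t.foldl max h ↔ ∃ u ∈ h :: t, v < u := by
  induction t generalizing h with
  | nil => simp
  | cons a t ih =>
    rw [List.foldl_cons, ih, List.exists_mem_cons_iff, List.exists_mem_cons_iff,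
        List.exists_mem_cons_iff, lt_max_iff]
    tauto

-- a row bucket's elements are the first components of the points on that row
theorem pvRowEx (pts : List (Int × Int)) (k : Int) (P : Int → Prop) :
    (∃ u ∈ ((pts.map (fun p => (p.2, p.1))).filter (fun q => q.1 == k)).map (·.2), P u)
      ↔ ∃ r ∈ pts, P r.1 ∧ r.2 = k := by
  simp only [List.mem_map, List.mem_filter, beq_iff_eq]
  constructor
  · rintro ⟨u, ⟨q, ⟨⟨r, hr, rfl⟩, hk⟩, rfl⟩, hP⟩
    exact ⟨r, hr, hP, hk⟩
  · rintro ⟨r, hr, hP, hk⟩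
    exact ⟨r.1, ⟨(r.2, r.1), ⟨⟨r, hr, rfl⟩, hk⟩, rfl⟩, hP⟩

-- a column bucket's elements are the second components of the points on that column
theorem pvColEx (pts : List (Int × Int)) (k : Int) (P : Int → Prop) :
    (∃ u ∈ ((pts.map (fun p => (p.1, p.2))).filter (fun q => q.1 == k)).map (·.2), P u)
      ↔ ∃ r ∈ pts, P r.2 ∧ r.1 = k := by
  simp only [List.mem_map, List.mem_filter, beq_iff_eq]
  constructor
  · rintro ⟨u, ⟨q, ⟨⟨r, hr, rfl⟩, hk⟩, rfl⟩, hP⟩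
    exact ⟨r, hr, hP, hk⟩
  · rintro ⟨r, hr, hP, hk⟩
    exact ⟨r.2, ⟨(r.1, r.2), ⟨⟨r, hr, rfl⟩, hk⟩, rfl⟩, hP⟩

-- A's dict at the key of a present point: contains holds and the stored pair is the
-- (running min, running max) of the point's nonempty bucket
theorem pvAPt (l : List (Int × Int)) (p : Int × Int) (hp : p ∈ l) :
    (l.foldl pvAUpdate PySem.Dict.empty).contains p.1 = true ∧
    ∃ h t, (l.filter (fun q => q.1 == p.1)).map (·.2) = h :: t ∧
      (l.foldl pvAUpdate PySem.Dict.empty).getD p.1 (0, 0)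
        = (t.foldl min h, t.foldl max h) := by
  have hne : p.2 ∈ (l.filter (fun q => q.1 == p.1)).map (·.2) := by
    refine List.mem_map_of_mem ?_
    rw [List.mem_filter]
    exact ⟨hp, by simp⟩
  cases hb : (l.filter (fun q => q.1 == p.1)).map (·.2) with
  | nil => rw [hb] at hne; cases hne
  | cons h t =>
    have hget : (l.foldl pvAUpdate PySem.Dict.empty).get? p.1 = some (pvExt (h, h) t) := by
      rw [pvG l PySem.Dict.empty p.1, PySem.Dict.get?_empty, hb]
    refine ⟨by rw [PySem.Dict.contains_eq_isSome_get?, hget]; rfl, h, t, rfl, ?_⟩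
    rw [PySem.Dict.getD_eq_get?_getD, hget, pvExt_eq]
    rfl

theorem pvMain (x y : List Int) (h : x.length ≤ y.length) :
    numIdleDrives x y = numIdleDrives_alt x y := by
  have hA : numIdleDrives x y
      = (PySem.List.pyRange 0 (x.length : Int)).foldl
          (pvACount x y ((PySem.List.pyRange 0 (x.length : Int)).foldl (pvABuild x y)
            (PySem.Dict.empty, PySem.Dict.empty))) 0 := rfl
  have hB : numIdleDrives_alt x y
      = (x.zip y).foldl (fun count p => if pvIdle (x.zip y) p then count + 1 else count) 0 := rfl
  rw [hA, hB]
  have hAB : pvABuild x y = fun s i =>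
      pvAStepVal s (PySem.List.pyGetD x i 0) (PySem.List.pyGetD y i 0) := rfl
  rw [hAB, pvFoldIdx x y h pvAStepVal]
  rw [show (fun (s : PySem.Dict Int (Int × Int) × PySem.Dict Int (Int × Int))
        (p : Int × Int) => pvAStepVal s p.1 p.2)
      = fun s p => (pvAUpdate s.1 (p.2, p.1), pvAUpdate s.2 (p.1, p.2)) from rfl]
  rw [PySem.List.foldl_prod_mk (fun d (p : Int × Int) => pvAUpdate d (p.2, p.1))
        (fun d (p : Int × Int) => pvAUpdate d (p.1, p.2)) (x.zip y)
        PySem.Dict.empty PySem.Dict.empty]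
  rw [show List.foldl (fun d (p : Int × Int) => pvAUpdate d (p.2, p.1)) PySem.Dict.empty (x.zip y)
        = List.foldl pvAUpdate PySem.Dict.empty ((x.zip y).map (fun p => (p.2, p.1))) from
      by rw [List.foldl_map]]
  rw [show List.foldl (fun d (p : Int × Int) => pvAUpdate d (p.1, p.2)) PySem.Dict.empty (x.zip y)
        = List.foldl pvAUpdate PySem.Dict.empty ((x.zip y).map (fun p => (p.1, p.2))) from
      by rw [List.foldl_map]]
  have hAC : ∀ maps, pvACount x y maps = fun c i =>
      pvACountVal maps c (PySem.List.pyGetD x i 0) (PySem.List.pyGetD y i 0) :=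
    fun _ => rfl
  rw [hAC, pvFoldIdx x y h]
  apply PySem.List.foldl_congr_mem
  intro acc p hp
  obtain ⟨hc1, h1, t1, hb1, hg1⟩ :=
    pvAPt ((x.zip y).map (fun p => (p.2, p.1))) (p.2, p.1) (List.mem_map_of_mem hp)
  obtain ⟨hc2, h2, t2, hb2, hg2⟩ :=
    pvAPt ((x.zip y).map (fun p => (p.1, p.2))) (p.1, p.2) (List.mem_map_of_mem hp)
  show pvACountVal _ acc p.1 p.2 = _
  unfold pvACountVal
  simp only [hc1, hc2, and_self, if_true]
  rw [hg1, hg2]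
  have hcond :
      (t1.foldl min h1 < p.1 ∧ p.1 < t1.foldl max h1 ∧
       t2.foldl min h2 < p.2 ∧ p.2 < t2.foldl max h2)
      ↔ pvIdle (x.zip y) p = true := by
    rw [pvFoldMinLt, pvFoldMaxGt, pvFoldMinLt, pvFoldMaxGt, ← hb1, ← hb2,
        pvRowEx _ _ (· < p.1), pvRowEx _ _ (p.1 < ·),
        pvColEx _ _ (· < p.2), pvColEx _ _ (p.2 < ·)]
    simp only [pvIdle, Bool.and_eq_true, List.any_eq_true, decide_eq_true_eq,
      beq_iff_eq, gt_iff_lt]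
    tauto
  by_cases hA4 : t1.foldl min h1 < p.1 ∧ p.1 < t1.foldl max h1 ∧
      t2.foldl min h2 < p.2 ∧ p.2 < t2.foldl max h2
  · rw [if_pos hA4, if_pos (hcond.mp hA4)]
  · rw [if_neg hA4, if_neg (fun hb => hA4 (hcond.mpr hb))]

-- ===== VERDICT (by name: the statement is the Claim_ definition above) =====
theorem numIdleDrives_spec : Claim_equal_numIdleDrives := by
  intro x y _ hpre
  unfold Spec_numIdleDrives
  exact pvMain x y hpre
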